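-- pv_equiv track=rewrite | github.com/ethanrowe/flowz | flowz/test/channels/iteration_test.py | determine_expected_values
-- ===== SOURCE A (Python) =====
-- def determine_expected_values(values):
--     values = list(values)
--     k = len(values) // 2
--     a = list(enumerate(values[:k]))
--     a += [a[-1] for _ in values[k:]]
--     b = [None for _ in values[:k]]
--     b += [(i + k, val) for i, val in enumerate(values[k:])]
--     return list(zip(a, b))
-- ===== SOURCE B (Python) =====
-- def determine_expected_values(values):
--     values = list(values)
--     n = len(values)
--     k = n // 2
--     return [((i, values[i]), None) if i < k
--             else ((k - 1, values[k - 1]), (i, values[i]))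
--             for i in range(n)]
-- ===== Notes on version B (the rewrite author's own statement) =====
-- stated objective: simpler
-- what changed: B computes each output element directly from its index by a closed-form rule (position i pairs with None below the midpoint and with the fixed sentinel (k-1, values[k-1]) above it), replacing A's two staged parallel lists a/b and the final zip with a single index comprehension.
-- outside the precondition, e.g. on determine_expected_values([7]): A raises IndexError, B returns [((-1, 7), (0, 7))]
import Mathlib
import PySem

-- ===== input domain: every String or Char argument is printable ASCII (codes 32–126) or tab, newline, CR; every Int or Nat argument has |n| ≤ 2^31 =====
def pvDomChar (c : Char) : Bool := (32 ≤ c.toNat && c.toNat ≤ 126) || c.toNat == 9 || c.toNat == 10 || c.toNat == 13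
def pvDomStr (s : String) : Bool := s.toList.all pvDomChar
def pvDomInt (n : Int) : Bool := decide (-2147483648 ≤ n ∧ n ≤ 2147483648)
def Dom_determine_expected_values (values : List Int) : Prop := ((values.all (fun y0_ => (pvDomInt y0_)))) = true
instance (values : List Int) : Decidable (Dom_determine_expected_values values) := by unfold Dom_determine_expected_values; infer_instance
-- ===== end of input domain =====

-- B computes each output element directly from its index by a closed-form rule instead of A's two staged parallel lists zipped at the end; objective: simpler.


-- ===== PORT A =====
-- a[-1] (IndexError when a is empty, i.e. len(values) == 1) is pyGetD with an arbitrary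
-- default; that input is excluded by Pre_ below.
def determine_expected_values (values : List Int) : List ((Int × Int) × (Option (Int × Int))) :=
  let k : Nat := values.length / 2          -- len(values) // 2, nonnegative
  let a0 := PySem.List.enumerate (PySem.List.slice values none (some (k : Int)))
  let a := a0 ++ (PySem.List.slice values (some (k : Int)) none).map
      (fun _ => PySem.List.pyGetD a0 (-1) (0, 0))
  let b := (PySem.List.slice values none (some (k : Int))).map
      (fun _ => (none : Option (Int × Int))) ++
    (PySem.List.enumerate (PySem.List.slice values (some (k : Int)) none)).map
      (fun p => some (p.1 + (k : Int), p.2))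
  a.zip b

-- ===== PORT B =====
-- values[i] and values[k-1] are pyGetD (Python indexing, negative wraps); i is always in
-- range, and k-1 is in range for every list admitted by Pre_ that reaches the else branch.
def determine_expected_values_alt (values : List Int) : List ((Int × Int) × (Option (Int × Int))) :=
  let n : Nat := values.length
  let k : Nat := n / 2
  (PySem.List.pyRange 0 (n : Int) 1).map (fun i =>
    if i < (k : Int) then ((i, PySem.List.pyGetD values i 0), none)
    else (((k : Int) - 1, PySem.List.pyGetD values ((k : Int) - 1) 0),
          some (i, PySem.List.pyGetD values i 0)))

-- ===== PRECONDITION & SPEC =====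
-- Pre_ excludes exactly the singleton lists, on which Python A raises IndexError (a[-1] on an empty a).
def Pre_determine_expected_values (values : List Int) : Prop := values.length ≠ 1
instance (values : List Int) : Decidable (Pre_determine_expected_values values) := by
  unfold Pre_determine_expected_values; infer_instance
def pvWitness_determine_expected_values : List Int := [1, 2, 3]

def Spec_determine_expected_values (values : List Int) (out : List ((Int × Int) × (Option (Int × Int)))) : Prop := out = determine_expected_values_alt values
instance (values : List Int) (out : List ((Int × Int) × (Option (Int × Int)))) : Decidable (Spec_determine_expected_values values out) := by unfold Spec_determine_expected_values; infer_instance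

-- ===== CLAIM (what is proved, stated in full; the proofs are below) =====
def Claim_equal_determine_expected_values : Prop := ∀ (values : List Int), Dom_determine_expected_values values → Pre_determine_expected_values values → Spec_determine_expected_values values (determine_expected_values values)

-- ===== LEMMAS AND PROOFS =====

theorem pv_zip_self_map {α β : Type} (l : List α) (f : α → β) :
    l.zip (l.map f) = l.map (fun x => (x, f x)) := by
  induction l with
  | nil => rfl
  | cons h t ih => simp [ih]

theorem determine_expected_values_spec_aux (values : List Int)
    (hpre : Pre_determine_expected_values values) :
    determine_expected_values values = determine_expected_values_alt values := by
  unfold determine_expected_values determine_expected_values_alt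
  simp only [PySem.List.slice_to_natCast, PySem.List.slice_from_natCast]
  set n : Nat := values.length with hn
  set k : Nat := n / 2 with hk
  set E := PySem.List.enumerate (values.take k) with hE
  set last := PySem.List.pyGetD E (-1) (0, 0) with hlast
  have hkn : k ≤ n := Nat.div_le_self n 2
  have hlenE : E.length = k := by
    rw [hE, PySem.List.length_enumerate, List.length_take]; omega
  -- A side: split the zip into the two halves
  rw [show (values.take k).map (fun _ => (none : Option (Int × Int)))
        = E.map (fun _ => (none : Option (Int × Int))) by
      rw [hE]; simp [List.map_const', PySem.List.length_enumerate]]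
  rw [show (values.drop k).map (fun _ => last)
        = (PySem.List.enumerate (values.drop k)).map (fun _ => last) by
      simp [List.map_const', PySem.List.length_enumerate]]
  rw [List.zip_append (by simp)]
  rw [pv_zip_self_map, List.zip_map']
  -- B side: split the range at k
  rw [PySem.List.pyRange_one_append 0 (k : Int) (n : Int) (by positivity) (by exact_mod_cast hkn),
      List.map_append]
  congr 1
  · -- first halves
    rw [hE, PySem.List.enumerate_eq_map_pyRange (values.take k) 0, List.map_map]
    rw [show PySem.List.len (values.take k) = (k : Int) by
      simp [PySem.List.len]; omega]
    apply List.map_congr_left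
    intro j hj
    rw [PySem.List.mem_pyRange_one] at hj
    simp only [Function.comp, if_pos hj.2]
    congr 2
    rw [show j = ((j.toNat : Nat) : Int) by omega, PySem.List.pyGetD_natCast,
        PySem.List.pyGetD_natCast]
    have hjk : j.toNat < k := by omega
    simp only [List.getD_eq_getElem?_getD, List.getElem?_take]
    simp [hjk]
  · -- second halves
    rw [PySem.List.enumerate_eq_map_pyRange (values.drop k) 0, List.map_map]
    have hlen2 : PySem.List.len (values.drop k) = (n : Int) - (k : Int) := by
      simp [PySem.List.len]; omega
    rw [hlen2]
    have hsplit : PySem.List.pyRange (k : Int) (n : Int) 1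
        = (PySem.List.pyRange 0 ((n : Int) - (k : Int)) 1).map (fun j => j + (k : Int)) := by
      rw [PySem.List.pyRange_one 0, PySem.List.pyRange_one (k : Int), List.map_map]
      rw [show ((n : Int) - (k : Int) - 0).toNat = ((n : Int) - (k : Int)).toNat by omega]
      apply List.map_congr_left
      intro m _
      simp only [Function.comp]; omega
    rw [hsplit, List.map_map]
    apply List.map_congr_left
    intro j hj
    rw [PySem.List.mem_pyRange_one] at hj
    have hj0 : 0 ≤ j := hj.1
    have hjlt : j < (n : Int) - (k : Int) := hj.2
    have hk1 : 1 ≤ k := by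
      have hne : values.length ≠ 1 := hpre
      omega
    simp only [Function.comp, if_neg (by omega : ¬ j + (k : Int) < (k : Int))]
    have hEne : E ≠ [] := by
      intro h; rw [h] at hlenE; simp at hlenE; omega
    have hlastval : last = ((k : Int) - 1, PySem.List.pyGetD values ((k : Int) - 1) 0) := by
      rw [hlast, PySem.List.pyGetD_neg_one E (0,0) hEne,
          List.getLast_eq_getElem]
      simp only [hE, PySem.List.getElem_enumerate, PySem.List.length_enumerate,
        List.length_take, List.getElem_take]
      have hkk : (k : Int) - 1 = (((k - 1 : Nat) : Nat) : Int) := by omega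
      rw [hkk, PySem.List.pyGetD_natCast]
      have hmin : min k values.length - 1 = k - 1 := by omega
      have hk1n : k - 1 < values.length := by omega
      simp only [hmin, List.getD_eq_getElem?_getD,
        List.getElem?_eq_getElem hk1n, Option.getD_some, Prod.mk.injEq]
      exact ⟨by omega, trivial⟩
    have h1 : PySem.List.pyGetD values (j + (k : Int)) 0
        = PySem.List.pyGetD (values.drop k) j 0 := by
      rw [show j + (k : Int) = ((j.toNat + k : Nat) : Int) by omega,
          PySem.List.pyGetD_natCast,
          show j = ((j.toNat : Nat) : Int) by omega, PySem.List.pyGetD_natCast]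
      simp only [List.getD_eq_getElem?_getD, List.getElem?_drop]
      rw [Nat.add_comm k j.toNat, Int.toNat_natCast]
    rw [hlastval, h1, Prod.mk.injEq, Prod.mk.injEq, Option.some.injEq, Prod.mk.injEq]
    refine ⟨⟨rfl, rfl⟩, by omega, rfl⟩

-- ===== VERDICT (by name: the statement is the Claim_ definition above) =====
theorem determine_expected_values_spec : Claim_equal_determine_expected_values := by
  intro values _ hpre
  exact determine_expected_values_spec_aux values hpre
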